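-- pv_equiv track=rewrite | github.com/Mapet13/Studia | ćwiczenia 7/15.py | should_remove
-- ===== SOURCE A (Python) =====
-- def should_remove(x):
--     count = [0, 0]
--     while x > 0:
--         r = x % 3
--         if r != 0:
--             count[r - 1] += 1
--         x //= 3
--     return count[0] > count[1]
-- ===== SOURCE B (Python) =====
-- def should_remove(x):
--     # Base-3 digit sum S and nonzero-digit count N determine the answer:
--     # #1-digits = 2N - S and #2-digits = S - N, so #1s > #2s  <=>  3N > 2S.
--     def digit_sum(y):
--         return 0 if y <= 0 else y % 3 + digit_sum(y // 3)
--     def nonzeros(y):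
--         return 0 if y <= 0 else (1 if y % 3 != 0 else 0) + nonzeros(y // 3)
--     return 3 * nonzeros(x) > 2 * digit_sum(x)
-- ===== Notes on version B (the rewrite author's own statement) =====
-- stated objective: alternative
-- what changed: B never counts 1s or 2s: it computes the base-3 digit sum S and the nonzero-digit count N by two recursive passes and decides via the identity '#1s > #2s iff 3N > 2S', instead of A's fused loop maintaining a two-cell counter array.
import Mathlib
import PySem

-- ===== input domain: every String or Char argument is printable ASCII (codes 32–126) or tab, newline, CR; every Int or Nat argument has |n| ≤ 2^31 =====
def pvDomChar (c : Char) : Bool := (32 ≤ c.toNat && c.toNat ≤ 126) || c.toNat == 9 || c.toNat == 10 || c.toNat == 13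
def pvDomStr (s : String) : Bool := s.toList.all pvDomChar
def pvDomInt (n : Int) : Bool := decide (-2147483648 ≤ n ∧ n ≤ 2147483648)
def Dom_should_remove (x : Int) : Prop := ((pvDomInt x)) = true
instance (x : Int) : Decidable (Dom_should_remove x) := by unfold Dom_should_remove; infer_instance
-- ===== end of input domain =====

-- B never counts 1s or 2s: it computes the base-3 digit sum S and the nonzero-digit
-- count N and decides via the identity '#1s > #2s iff 3N > 2S' (alternative algorithm, same cost).

-- ===== PORT A =====
-- the while loop of A: state = (x, count[0], count[1])
def should_remove_loop (x c1 c2 : Int) : Bool :=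
  if 0 < x then
    let r := PySem.Int.mod x 3
    if r ≠ 0 then
      -- count[r - 1] += 1 : r = 1 bumps count[0], r = 2 bumps count[1]
      if r = 1 then should_remove_loop (PySem.Int.floordiv x 3) (c1 + 1) c2
      else should_remove_loop (PySem.Int.floordiv x 3) c1 (c2 + 1)
    else should_remove_loop (PySem.Int.floordiv x 3) c1 c2
  else decide (c1 > c2)
termination_by x.toNat
decreasing_by all_goals
  · rw [PySem.Int.floordiv_eq_ediv_of_pos (by omega : (0:Int) < 3)]; omega

def should_remove (x : Int) : Bool := should_remove_loop x 0 0

-- ===== PORT B =====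
-- B's first recursive pass: base-3 digit sum
def pvDigitSum3 (y : Int) : Int :=
  if y ≤ 0 then 0 else PySem.Int.mod y 3 + pvDigitSum3 (PySem.Int.floordiv y 3)
termination_by y.toNat
decreasing_by
  rw [PySem.Int.floordiv_eq_ediv_of_pos (by omega : (0:Int) < 3)]; omega

-- B's second recursive pass: number of nonzero base-3 digits
def pvNonzeros3 (y : Int) : Int :=
  if y ≤ 0 then 0
  else (if PySem.Int.mod y 3 ≠ 0 then 1 else 0) + pvNonzeros3 (PySem.Int.floordiv y 3)
termination_by y.toNat
decreasing_by
  rw [PySem.Int.floordiv_eq_ediv_of_pos (by omega : (0:Int) < 3)]; omega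

def should_remove_alt (x : Int) : Bool :=
  decide (3 * pvNonzeros3 x > 2 * pvDigitSum3 x)

-- ===== PRECONDITION & SPEC =====
def Spec_should_remove (x : Int) (out : Bool) : Prop := out = should_remove_alt x
instance (x : Int) (out : Bool) : Decidable (Spec_should_remove x out) := by unfold Spec_should_remove; infer_instance

-- ===== CLAIM =====
def Claim_equal_should_remove : Prop := ∀ (x : Int), Dom_should_remove x → Spec_should_remove x (should_remove x)

-- ===== LEMMAS AND PROOFS =====
-- A's loop with counters (c1, c2) equals B's arithmetic test shifted by c1 - c2:
-- c1 > c2 at the end iff (c1 - c2) + (3N - 2S) > 0 now.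
lemma should_remove_loop_eq (x c1 c2 : Int) :
    should_remove_loop x c1 c2 =
      decide (c1 - c2 + (3 * pvNonzeros3 x - 2 * pvDigitSum3 x) > 0) := by
  induction x, c1, c2 using should_remove_loop.induct with
  | case1 x c1 c2 hx r hr h1 ih =>
    have h1' : PySem.Int.mod x 3 = 1 := h1
    rw [should_remove_loop, pvDigitSum3, pvNonzeros3]
    simp only [hx, if_pos, if_neg (by omega : ¬ x ≤ 0), h1', ih]
    simp [decide_eq_decide]
    omega
  | case2 x c1 c2 hx r hr h1 ih =>
    have h2' : PySem.Int.mod x 3 = 2 := by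
      have he := PySem.Int.mod_eq_emod_of_pos (a := x) (by omega : (0:Int) < 3)
      have h3 : x % 3 < 3 := Int.emod_lt_of_pos x (by omega)
      have h0 : 0 ≤ x % 3 := Int.emod_nonneg x (by omega)
      have hr' : PySem.Int.mod x 3 ≠ 0 := hr
      have h1'' : PySem.Int.mod x 3 ≠ 1 := h1
      omega
    rw [should_remove_loop, pvDigitSum3, pvNonzeros3]
    simp only [hx, if_pos, if_neg (by omega : ¬ x ≤ 0), h2', ih]
    simp [decide_eq_decide]
    omega
  | case3 x c1 c2 hx r hr ih =>
    have h0' : PySem.Int.mod x 3 = 0 := of_not_not hr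
    rw [should_remove_loop, pvDigitSum3, pvNonzeros3]
    simp only [hx, if_pos, if_neg (by omega : ¬ x ≤ 0), h0', ih]
    simp
  | case4 x c1 c2 hx =>
    rw [should_remove_loop, pvDigitSum3, pvNonzeros3]
    simp only [hx, if_neg, if_pos (by omega : x ≤ 0)]
    simp

-- ===== VERDICT =====
theorem should_remove_spec : Claim_equal_should_remove := by
  intro x _
  show should_remove x = should_remove_alt x
  unfold should_remove should_remove_alt
  rw [should_remove_loop_eq]
  simp
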